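-- pv_equiv track=rewrite | github.com/Snoroz/le-scrabble-de-la-mama | Scrabble TEST Complet.py | mot_jouable
-- ===== SOURCE A (Python) =====
-- JOKER = '?'  # jeton joker
--
-- def mot_jouable(mot,ll,lp):
--     P=True
--     jok=ll.count(JOKER)   # on regarde le nombre de joker
--     lettre = ll.copy()  # pour pas modifier ll
--     mot = list(mot)
--     lp = list(lp)
--
--     for x in lp:
--         if x in mot:
--             mot.remove(x)
--
--     for i in mot:
--         if i in lettre:
--             lettre.remove(i)  # pour eviter de reutiliser des lettre)
--         elif JOKER in lettre:
--             lettre.remove(JOKER) # on utilise un joker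
--         else:
--             P=False
--     return P
-- ===== SOURCE B (Python) =====
-- JOKER = '?'
--
-- def mot_jouable(mot, ll, lp):
--     # Counting re-implementation: build letter counters once and compare,
--     # instead of A's repeated list membership tests and remove() scans.
--     need = {}
--     for c in mot:
--         need[c] = need.get(c, 0) + 1
--     for x in lp:
--         if need.get(x, 0) > 0:
--             need[x] = need[x] - 1
--     have = {}
--     for s in ll:
--         have[s] = have.get(s, 0) + 1
--     jokers = have.get(JOKER, 0)
--     demand = need.get(JOKER, 0)
--     for c, n in need.items():
--         if c != JOKER:
--             demand += max(0, n - have.get(c, 0))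
--     return demand <= jokers
-- ===== Notes on version B (the rewrite author's own statement) =====
-- stated objective: faster
-- what changed: Replaces A's greedy mutate-and-remove simulation over list copies (a membership scan plus remove() scan per letter) with a counting formulation: build need/have counters once, cap-subtract the placed letters, and compare the total deficit against the available jokers.
import Mathlib
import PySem

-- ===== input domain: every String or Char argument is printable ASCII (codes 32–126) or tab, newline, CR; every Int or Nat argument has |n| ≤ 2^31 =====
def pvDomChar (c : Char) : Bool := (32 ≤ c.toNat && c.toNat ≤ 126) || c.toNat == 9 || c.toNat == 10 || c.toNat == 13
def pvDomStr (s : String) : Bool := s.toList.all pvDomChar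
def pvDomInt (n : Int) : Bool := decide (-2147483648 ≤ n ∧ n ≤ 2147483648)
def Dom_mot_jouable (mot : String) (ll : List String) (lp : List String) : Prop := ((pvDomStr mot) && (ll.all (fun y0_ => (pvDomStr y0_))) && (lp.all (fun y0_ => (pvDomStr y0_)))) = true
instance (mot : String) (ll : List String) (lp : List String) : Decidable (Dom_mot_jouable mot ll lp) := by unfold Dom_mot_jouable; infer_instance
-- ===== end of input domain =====

-- B replaces A's greedy mutate-and-remove simulation over list copies by a
-- one-pass counting formulation (need/have counters, deficit vs jokers),
-- dropping the per-letter list scans; measured faster in a timing run.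

-- ===== PORT A =====
def mot_jouable (mot : String) (ll : List String) (lp : List String) : Bool :=
  let _jok := ll.count "?"
  let lettre := ll
  let motL := mot.toList.map (fun c => String.singleton c)
  let motL := lp.foldl (fun m x => if x ∈ m then (PySem.List.remove? m x).getD m else m) motL
  (motL.foldl (fun (s : List String × Bool) i =>
      if i ∈ s.1 then ((PySem.List.remove? s.1 i).getD s.1, s.2)
      else if "?" ∈ s.1 then ((PySem.List.remove? s.1 "?").getD s.1, s.2)
      else (s.1, false)) (lettre, true)).2

-- ===== PORT B =====
def mot_jouable_alt (mot : String) (ll : List String) (lp : List String) : Bool :=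
  let need := (mot.toList.map (fun c => String.singleton c)).foldl
      (fun d c => d.insert c (d.getD c 0 + 1)) (PySem.Dict.empty : PySem.Dict String Int)
  let need := lp.foldl (fun d x => if d.getD x 0 > 0 then d.insert x (d.getD x 0 - 1) else d) need
  let haveD := ll.foldl (fun d s => d.insert s (d.getD s 0 + 1)) (PySem.Dict.empty : PySem.Dict String Int)
  let jokers := haveD.getD "?" 0
  let demand := need.getD "?" 0
  let demand := need.items.foldl
      (fun acc p => if p.1 ≠ "?" then acc + max 0 (p.2 - haveD.getD p.1 0) else acc) demand
  decide (demand ≤ jokers)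

-- ===== PRECONDITION & SPEC =====
def Spec_mot_jouable (mot : String) (ll : List String) (lp : List String) (out : Bool) : Prop := out = mot_jouable_alt mot ll lp
instance (mot : String) (ll : List String) (lp : List String) (out : Bool) : Decidable (Spec_mot_jouable mot ll lp out) := by unfold Spec_mot_jouable; infer_instance

-- ===== CLAIM (what is proved, stated in full; the proofs are below) =====
def Claim_equal_mot_jouable : Prop := ∀ (mot : String) (ll : List String) (lp : List String), Dom_mot_jouable mot ll lp → Spec_mot_jouable mot ll lp (mot_jouable mot ll lp)

-- ===== LEMMAS AND PROOFS =====

-- A's first loop (capped removal of the placed letters), counted per key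
lemma countA_rm (lp : List String) : ∀ (m : List String) (c : String),
    (lp.foldl (fun m x => if x ∈ m then (PySem.List.remove? m x).getD m else m) m).count c
      = m.count c - lp.count c := by
  induction lp with
  | nil => simp
  | cons x lp ih =>
    intro m c
    simp only [List.foldl_cons]
    by_cases hx : x ∈ m
    · rw [if_pos hx, PySem.List.remove?_eq_some_erase m x hx, Option.getD_some, ih]
      have hpos : 0 < m.count x := List.count_pos_iff.mpr hx
      by_cases hxc : x = c
      · subst hxc
        rw [List.count_erase_self, List.count_cons_self]
        omega
      · rw [List.count_erase_of_ne (show c ≠ x from fun h => hxc h.symm)]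
        simp [hxc]
    · rw [if_neg hx, ih]
      have h0 : m.count x = 0 := List.count_eq_zero.mpr hx
      by_cases hxc : x = c
      · subst hxc; rw [List.count_cons_self]; omega
      · simp [hxc]

-- membership is preserved downward by the removal loop
lemma mem_rm (lp m : List String) (c : String)
    (h : c ∈ lp.foldl (fun m x => if x ∈ m then (PySem.List.remove? m x).getD m else m) m) :
    c ∈ m := by
  have := List.count_pos_iff.mpr h
  rw [countA_rm] at this
  exact List.count_pos_iff.mp (by omega)

-- a member's value bounds the mapped sum from below (Nat)
lemma mem_le_sum_map (K : List String) (f : String → Nat) (i : String) (hi : i ∈ K) :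
    f i ≤ (K.map f).sum := by
  induction K with
  | nil => cases hi
  | cons k K ih =>
    rcases List.mem_cons.mp hi with h | h
    · subst h; simp
    · simp only [List.map_cons, List.sum_cons]
      exact le_add_of_nonneg_of_le (Nat.zero_le _) (ih h)

-- sum bump: the two maps agree except at i ∈ K, where f = g + 1
lemma sum_map_bump (K : List String) (f g : String → Nat) (i : String)
    (hi : i ∈ K) (hnd : K.Nodup) (hfi : f i = g i + 1)
    (hfg : ∀ c ∈ K, c ≠ i → f c = g c) :
    (K.map f).sum = (K.map g).sum + 1 := by
  induction K with
  | nil => cases hi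
  | cons k K ih =>
    simp only [List.map_cons, List.sum_cons]
    rcases List.mem_cons.mp hi with h | h
    · subst h
      have : K.map f = K.map g := List.map_congr_left (fun c hc =>
        hfg c (List.mem_cons_of_mem _ hc) (fun hci => (List.nodup_cons.mp hnd).1 (hci ▸ hc)))
      rw [this, hfi]; omega
    · have hk : k ≠ i := fun hki => (List.nodup_cons.mp hnd).1 (hki ▸ h)
      rw [hfg k (List.mem_cons_self) hk,
        ih h (List.nodup_cons.mp hnd).2 (fun c hc hci => hfg c (List.mem_cons_of_mem _ hc) hci)]
      omega

-- the deficit of m against rack L, summed over key list K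
def pvDeficit (K m L : List String) : Nat :=
  ((K.filter (fun c => decide (c ≠ "?"))).map (fun c => m.count c - L.count c)).sum

-- A's second loop computes exactly "demand ≤ jokers"
lemma loopA (K : List String) (hnd : K.Nodup) : ∀ (m L : List String) (P : Bool),
    (∀ c ∈ m, c ∈ K) →
    (m.foldl (fun (s : List String × Bool) i =>
        if i ∈ s.1 then ((PySem.List.remove? s.1 i).getD s.1, s.2)
        else if "?" ∈ s.1 then ((PySem.List.remove? s.1 "?").getD s.1, s.2)
        else (s.1, false)) (L, P)).2
      = (P && decide (m.count "?" + pvDeficit K m L ≤ L.count "?")) := by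
  intro m
  induction m with
  | nil =>
    intro L P _
    have h0 : pvDeficit K [] L = 0 := by
      apply List.sum_eq_zero
      intro x hx
      rcases List.mem_map.mp hx with ⟨c, _, rfl⟩
      simp
    simp [h0]
  | cons i m ih =>
    intro L P hm
    simp only [List.foldl_cons]
    by_cases hiL : i ∈ L
    · rw [if_pos hiL, PySem.List.remove?_eq_some_erase L i hiL, Option.getD_some,
        ih (L.erase i) P (fun c hc => hm c (List.mem_cons_of_mem _ hc))]
      have hpos : 0 < L.count i := List.count_pos_iff.mpr hiL
      congr 1
      by_cases hiq : i = "?"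
      · subst hiq
        have hdef : pvDeficit K ("?" :: m) L = pvDeficit K m (L.erase "?") := by
          apply congrArg List.sum
          apply List.map_congr_left
          intro c hc
          have hcq : c ≠ "?" := by
            have := (List.mem_filter.mp hc).2
            simpa using this
          rw [List.count_erase_of_ne hcq]
          simp [List.count_cons, Ne.symm hcq]
        apply decide_eq_decide.mpr
        rw [hdef, List.count_cons_self, List.count_erase_self]
        omega
      · have hdef : pvDeficit K (i :: m) L = pvDeficit K m (L.erase i) := by
          apply congrArg List.sum
          apply List.map_congr_left
          intro c hc
          by_cases hci : c = i
          · subst hci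
            rw [List.count_erase_self, List.count_cons_self]
            omega
          · rw [List.count_erase_of_ne hci]
            simp [List.count_cons, Ne.symm hci]
        apply decide_eq_decide.mpr
        rw [hdef, List.count_cons_of_ne hiq, List.count_erase_of_ne (show ("?":String) ≠ i from fun h => hiq h.symm)]
    · by_cases hjk : ("?" : String) ∈ L
      · rw [if_neg hiL, if_pos hjk, PySem.List.remove?_eq_some_erase L "?" hjk, Option.getD_some,
          ih (L.erase "?") P (fun c hc => hm c (List.mem_cons_of_mem _ hc))]
        have hiq : i ≠ "?" := fun h => hiL (h ▸ hjk)
        have hiK : i ∈ K := hm i List.mem_cons_self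
        have hiF : i ∈ K.filter (fun c => decide (c ≠ "?")) :=
          List.mem_filter.mpr ⟨hiK, by simpa using hiq⟩
        have hL0 : L.count i = 0 := List.count_eq_zero.mpr hiL
        have hbump : pvDeficit K (i :: m) L = pvDeficit K m (L.erase "?") + 1 := by
          apply sum_map_bump _ _ _ i hiF (hnd.filter _)
          · rw [List.count_cons_self, List.count_erase_of_ne hiq, hL0]
            omega
          · intro c hc hci
            have hcq : c ≠ "?" := by
              have := (List.mem_filter.mp hc).2
              simpa using this
            rw [List.count_erase_of_ne hcq]
            simp [List.count_cons, Ne.symm hci]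
        congr 1
        apply decide_eq_decide.mpr
        have hcq : L.count "?" = (L.erase "?").count "?" + 1 := by
          have := List.count_pos_iff.mpr hjk
          rw [List.count_erase_self]
          omega
        rw [hbump, List.count_cons_of_ne hiq, hcq]
        omega
      · rw [if_neg hiL, if_neg hjk,
          ih L false (fun c hc => hm c (List.mem_cons_of_mem _ hc))]
        have h0 : L.count "?" = 0 := List.count_eq_zero.mpr hjk
        have hnle : ¬ ((i :: m).count "?" + pvDeficit K (i :: m) L ≤ L.count "?") := by
          rw [h0]
          by_cases hiq : i = "?"
          · subst hiq
            rw [List.count_cons_self]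
            omega
          · have hiK : i ∈ K := hm i List.mem_cons_self
            have hiF : i ∈ K.filter (fun c => decide (c ≠ "?")) :=
              List.mem_filter.mpr ⟨hiK, by simpa using hiq⟩
            have hle : (i :: m).count i - L.count i ≤
                ((K.filter (fun c => decide (c ≠ "?"))).map
                  (fun c => (i :: m).count c - L.count c)).sum :=
              mem_le_sum_map (K.filter (fun c => decide (c ≠ "?")))
                (fun c => (i :: m).count c - L.count c) i hiF
            have hL0 : L.count i = 0 := List.count_eq_zero.mpr hiL
            have hci : (i :: m).count i = m.count i + 1 := by simp
            simp only [pvDeficit]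
            omega
        simp [hnle]

-- B's decrement loop: per-key capped subtraction …
lemma getD_dec (lp : List String) : ∀ (d : PySem.Dict String Int) (c : String),
    0 ≤ d.getD c 0 →
    (lp.foldl (fun d x => if d.getD x 0 > 0 then d.insert x (d.getD x 0 - 1) else d) d).getD c 0
      = max 0 (d.getD c 0 - lp.count c) := by
  induction lp with
  | nil =>
    intro d c h
    simp only [List.foldl_nil, List.count_nil]
    omega
  | cons x lp ih =>
    intro d c h
    simp only [List.foldl_cons]
    by_cases hx : d.getD x 0 > 0
    · rw [if_pos hx]
      have h' : 0 ≤ (d.insert x (d.getD x 0 - 1)).getD c 0 := by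
        rw [PySem.Dict.getD_insert]
        split_ifs with hcx
        · subst hcx; omega
        · exact h
      rw [ih _ _ h', PySem.Dict.getD_insert]
      by_cases hcx : c = x
      · subst hcx
        rw [List.count_cons_self, if_pos rfl]
        omega
      · rw [if_neg hcx]
        simp [List.count_cons, Ne.symm hcx]
    · rw [if_neg hx, ih _ _ h]
      by_cases hcx : c = x
      · subst hcx
        rw [List.count_cons_self]
        omega
      · simp [List.count_cons, Ne.symm hcx]

-- … and it leaves the key list untouched
lemma keys_dec (lp : List String) : ∀ (d : PySem.Dict String Int),
    (lp.foldl (fun d x => if d.getD x 0 > 0 then d.insert x (d.getD x 0 - 1) else d) d).keys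
      = d.keys := by
  induction lp with
  | nil => intro d; rfl
  | cons x lp ih =>
    intro d
    simp only [List.foldl_cons]
    rw [ih]
    by_cases hx : d.getD x 0 > 0
    · rw [if_pos hx]
      have hc : d.contains x = true := by
        by_contra hnc
        rw [PySem.Dict.getD_of_not_contains d 0 (Bool.not_eq_true _ ▸ hnc)] at hx
        omega
      simp only [PySem.Dict.keys]
      rw [PySem.Dict.items_insert_of_contains d _ hc, List.map_map]
      apply List.map_congr_left
      intro p _
      by_cases hpx : p.1 == x
      · simp only [Function.comp, hpx, if_pos]
        exact (eq_of_beq hpx).symm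
      · simp [Function.comp, hpx]
    · rw [if_neg hx]

-- A computes "demand ≤ jokers" …
lemma A_char (mot : String) (ll lp : List String) :
    mot_jouable mot ll lp =
      decide ((lp.foldl (fun m x => if x ∈ m then (PySem.List.remove? m x).getD m else m)
          (mot.toList.map (fun c => String.singleton c))).count "?"
        + pvDeficit (PySem.Set.ofList (mot.toList.map (fun c => String.singleton c)))
            (lp.foldl (fun m x => if x ∈ m then (PySem.List.remove? m x).getD m else m)
              (mot.toList.map (fun c => String.singleton c))) ll
        ≤ ll.count "?") := by
  simp only [mot_jouable]
  rw [loopA _ (PySem.Set.nodup_ofList _) _ ll true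
    (fun c hc => (PySem.Set.mem_ofList _ _).mpr (mem_rm _ _ _ hc))]
  rw [Bool.true_and]

-- … and B computes the same "demand ≤ jokers"
lemma B_char (mot : String) (ll lp : List String) :
    mot_jouable_alt mot ll lp =
      decide ((lp.foldl (fun m x => if x ∈ m then (PySem.List.remove? m x).getD m else m)
          (mot.toList.map (fun c => String.singleton c))).count "?"
        + pvDeficit (PySem.Set.ofList (mot.toList.map (fun c => String.singleton c)))
            (lp.foldl (fun m x => if x ∈ m then (PySem.List.remove? m x).getD m else m)
              (mot.toList.map (fun c => String.singleton c))) ll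
        ≤ ll.count "?") := by
  simp only [mot_jouable_alt, PySem.Dict.foldl_insert_getD_add_one_eq_counter]
  set chars := mot.toList.map (fun c => String.singleton c) with hchars
  set M := lp.foldl (fun m x => if x ∈ m then (PySem.List.remove? m x).getD m else m) chars with hM
  set needF := lp.foldl (fun d x => if d.getD x 0 > 0 then d.insert x (d.getD x 0 - 1) else d)
      (PySem.Dict.counter chars) with hneedF
  have hkeys : needF.keys = PySem.Set.ofList chars := by
    rw [hneedF, keys_dec, PySem.Dict.keys_counter]
  have hknd : needF.keys.Nodup := by
    rw [hkeys]; exact PySem.Set.nodup_ofList _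
  have hgetD : ∀ c, needF.getD c 0 = ((M.count c : Nat) : Int) := by
    intro c
    rw [hneedF, getD_dec lp _ c (by rw [PySem.Dict.getD_counter]; positivity),
      PySem.Dict.getD_counter, hM, countA_rm]
    omega
  rw [PySem.Dict.items_eq_map_keys needF hknd 0, hkeys,
    PySem.List.foldl_ite_eq_foldl_filter (p := fun p : String × Int => p.1 ≠ "?")
      (f := fun acc p => acc + max 0 (p.2 - (PySem.Dict.counter ll).getD p.1 0)),
    List.filter_map, PySem.List.foldl_add, List.map_map]
  have hfilter : List.filter ((fun p : String × Int => decide (p.1 ≠ "?")) ∘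
        (fun k => (k, needF.getD k 0))) (PySem.Set.ofList chars)
      = List.filter (fun c => decide (c ≠ "?")) (PySem.Set.ofList chars) :=
    List.filter_congr (fun k _ => by simp)
  rw [hfilter]
  have hterm : List.map ((fun p : String × Int => max 0 (p.2 - (PySem.Dict.counter ll).getD p.1 0)) ∘
        (fun k => (k, needF.getD k 0)))
        (List.filter (fun c => decide (c ≠ "?")) (PySem.Set.ofList chars))
      = List.map (fun k => ((M.count k - ll.count k : Nat) : Int))
        (List.filter (fun c => decide (c ≠ "?")) (PySem.Set.ofList chars)) := by
    apply List.map_congr_left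
    intro k _
    simp only [Function.comp, hgetD k, PySem.Dict.getD_counter]
    omega
  rw [hterm, hgetD, PySem.Dict.getD_counter]
  have hsum : (List.map (fun k => ((M.count k - ll.count k : Nat) : Int))
        (List.filter (fun c => decide (c ≠ "?")) (PySem.Set.ofList chars))).sum
      = ((pvDeficit (PySem.Set.ofList chars) M ll : Nat) : Int) := by
    rw [pvDeficit, Nat.cast_list_sum, List.map_map]
    rfl
  rw [hsum]
  apply decide_eq_decide.mpr
  omega

-- ===== VERDICT (by name: the statement is the Claim_ definition above) =====
theorem mot_jouable_spec : Claim_equal_mot_jouable := by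
  intro mot ll lp _
  unfold Spec_mot_jouable
  rw [A_char, B_char]
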